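-- pv_equiv track=rewrite | github.com/jorendorff/advent-of-code | ad2019/dec16/part2.py | phase
-- ===== SOURCE A (Python) =====
-- def partial_sums(arr):
--     psums = [0]
--     t = 0
--     for e in arr:
--         t += e
--         psums.append(t)
--     return psums
--
-- def phase(arr):
--     N = len(arr)
--     psums = partial_sums(arr)
--     def sumrange(start, stop):
--         if stop > N:
--             stop = N
--         return psums[stop] - psums[start]
--
--     def result_at(w):
--         start = w - 1
--         polarity = 1
--         total = 0
--         while start < N:
--             total += polarity * sumrange(start, start + w)
--             start += w + w
--             polarity = -polarity
--         return abs(total) % 10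
--
--     return [result_at(i) for i in range(1, N + 1)]
-- ===== SOURCE B (Python) =====
-- def phase(arr):
--     # Naive direct FFT phase: for each output position w, re-scan the whole
--     # array with the repeating base pattern 0,1,0,-1 stretched by w (offset 1).
--     N = len(arr)
--     out = []
--     for w in range(1, N + 1):
--         total = 0
--         for i in range(N):
--             total += arr[i] * [0, 1, 0, -1][((i + 1) // w) % 4]
--         out.append(abs(total) % 10)
--     return out
-- ===== Notes on version B (the rewrite author's own statement) =====
-- stated objective: simpler
-- what changed: Replaced the prefix-sum table plus alternating-block while-loop with the textbook direct transform: each output position w re-scans the whole array, multiplying element i by the base pattern 0,1,0,-1 indexed by ((i+1)//w)%4.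
import Mathlib
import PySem

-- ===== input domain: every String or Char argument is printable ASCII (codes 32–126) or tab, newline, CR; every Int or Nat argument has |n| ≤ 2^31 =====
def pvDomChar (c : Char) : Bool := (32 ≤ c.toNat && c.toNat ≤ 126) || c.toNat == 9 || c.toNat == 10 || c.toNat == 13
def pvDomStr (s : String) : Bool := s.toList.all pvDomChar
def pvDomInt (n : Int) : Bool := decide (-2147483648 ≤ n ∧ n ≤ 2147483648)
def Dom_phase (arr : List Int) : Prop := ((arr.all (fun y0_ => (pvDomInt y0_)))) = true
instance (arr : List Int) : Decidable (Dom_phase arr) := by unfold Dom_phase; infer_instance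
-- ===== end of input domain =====

-- B replaces A's prefix-sum table and alternating-block while-loop by the textbook
-- direct transform (each position re-scans the array with the stretched pattern): simpler.

-- ===== PORT A =====
def partial_sums (arr : List Int) : List Int :=
  (arr.foldl (fun (st : List Int × Int) e => (st.1 ++ [st.2 + e], st.2 + e)) ([0], 0)).1

def sumrangeA (psums : List Int) (N start stop : Int) : Int :=
  let stop' := if stop > N then N else stop
  PySem.List.pyGetD psums stop' 0 - PySem.List.pyGetD psums start 0

-- the '0 < w' conjunct only guards termination: for w ≤ 0 with start < N, Python's
-- while-loop would not terminate either (never reached: w comes from range(1, N+1))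
def loopA (psums : List Int) (N w start polarity total : Int) : Int :=
  if _h : start < N ∧ 0 < w then
    loopA psums N w (start + w + w) (-polarity)
      (total + polarity * sumrangeA psums N start (start + w))
  else total
termination_by (N - start).toNat
decreasing_by omega

def phase (arr : List Int) : List Int :=
  let N : Int := arr.length
  let psums := partial_sums arr
  (PySem.List.pyRange 1 (N + 1) 1).map (fun w =>
    PySem.Int.mod |loopA psums N w (w - 1) 1 0| 10)

-- ===== PORT B =====
def patternMult (w i : Int) : Int :=
  PySem.List.pyGetD ([0, 1, 0, -1] : List Int)
    (PySem.Int.mod (PySem.Int.floordiv (i + 1) w) 4) 0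

def phase_alt (arr : List Int) : List Int :=
  let N : Int := arr.length
  (PySem.List.pyRange 1 (N + 1) 1).foldl (fun out w =>
    out ++ [PySem.Int.mod
      |(PySem.List.pyRange 0 N 1).foldl
        (fun total i => total + PySem.List.pyGetD arr i 0 * patternMult w i) 0| 10]) []

-- ===== PRECONDITION & SPEC =====
def Spec_phase (arr : List Int) (out : List Int) : Prop := out = phase_alt arr
instance (arr : List Int) (out : List Int) : Decidable (Spec_phase arr out) := by unfold Spec_phase; infer_instance

-- ===== CLAIM (what is proved, stated in full; the proofs are below) =====
def Claim_equal_phase : Prop := ∀ (arr : List Int), Dom_phase arr → Spec_phase arr (phase arr)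

-- ===== LEMMAS AND PROOFS =====

-- the pattern multiplier as a function of Nat indices
def gmul (w i : ℕ) : Int :=
  if (i + 1) / w % 4 = 1 then 1 else if (i + 1) / w % 4 = 3 then -1 else 0

theorem partial_sums_foldl (l : List Int) : ∀ (acc : List Int) (t : Int),
    (l.foldl (fun (st : List Int × Int) e => (st.1 ++ [st.2 + e], st.2 + e)) (acc, t)).1
      = acc ++ (List.range l.length).map (fun j => t + (l.take (j + 1)).sum) := by
  induction l with
  | nil => intro acc t; simp
  | cons e tl ih =>
    intro acc t
    simp only [List.foldl_cons, ih, List.length_cons, List.range_succ_eq_map,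
      List.map_cons, List.map_map]
    simp [Function.comp, List.append_assoc, add_assoc]

theorem sum_take (l : List Int) : ∀ (a : ℕ), a ≤ l.length →
    (l.take a).sum = ∑ i ∈ Finset.range a, l.getD i 0 := by
  intro a
  induction a with
  | zero => simp
  | succ a ih =>
    intro ha
    have ha' : a < l.length := by omega
    rw [Finset.sum_range_succ, ← ih (by omega), List.sum_take_succ l a ha']
    simp [List.getD, List.getElem?_eq_getElem ha']

theorem psums_getD (l : List Int) (j : ℕ) (hj : j ≤ l.length) :
    (partial_sums l).getD j 0 = (l.take j).sum := by
  unfold partial_sums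
  rw [partial_sums_foldl]
  cases j with
  | zero => simp
  | succ j =>
    have hj' : j < l.length := by omega
    simp [List.getD, hj', List.getElem_map]

theorem sum_Ico_getD (l : List Int) (a b : ℕ) (hab : a ≤ b) (hb : b ≤ l.length) :
    (l.take b).sum - (l.take a).sum = ∑ i ∈ Finset.Ico a b, l.getD i 0 := by
  rw [sum_take l a (by omega), sum_take l b hb, Finset.range_eq_Ico,
    ← Finset.sum_Ico_consecutive _ (Nat.zero_le a) hab]
  ring

theorem patternMult_eq (w i : ℕ) : patternMult ↑w ↑i = gmul w i := by
  unfold patternMult gmul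
  have h1 : ((i : Int) + 1) = ((i + 1 : ℕ) : Int) := by push_cast; ring
  have h4 : (4 : Int) = ((4 : ℕ) : Int) := rfl
  rw [h1, PySem.Int.floordiv_natCast, h4, PySem.Int.mod_natCast]
  have hlt : (i + 1) / w % 4 < 4 := Nat.mod_lt _ (by norm_num)
  have : (i + 1) / w % 4 = 0 ∨ (i + 1) / w % 4 = 1 ∨ (i + 1) / w % 4 = 2 ∨
      (i + 1) / w % 4 = 3 := by omega
  rcases this with h | h | h | h <;> rw [h] <;> simp <;> decide

theorem sumrangeA_eq (l : List Int) (s w : ℕ) (hs : s ≤ l.length) :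
    sumrangeA (partial_sums l) ↑l.length ↑s (↑s + ↑w)
      = ∑ i ∈ Finset.Ico s (min (s + w) l.length), l.getD i 0 := by
  unfold sumrangeA
  have hcast : ((s : Int) + (w : Int)) = ((s + w : ℕ) : Int) := by push_cast; ring
  have hstop : (if (s : Int) + (w : Int) > ↑l.length then (l.length : Int)
      else (s : Int) + (w : Int)) = ((min (s + w) l.length : ℕ) : Int) := by
    rw [hcast]
    split_ifs with h
    · have : min (s + w) l.length = l.length := by
        have := Nat.cast_lt (α := Int) |>.mp (by exact_mod_cast h)
        omega
      rw [this]
    · have : min (s + w) l.length = s + w := by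
        have : ¬ (l.length < s + w) := by
          intro hc; exact h (by exact_mod_cast Nat.cast_lt (α := Int) |>.mpr hc)
        omega
      rw [this]
  simp only [hstop, PySem.List.pyGetD_natCast]
  rw [psums_getD l _ (by omega), psums_getD l s hs]
  exact sum_Ico_getD l s _ (by omega) (by omega)

theorem gmul_block_one (w i k : ℕ) (hw : 1 ≤ w)
    (h1 : (2 * k + 1) * w - 1 ≤ i) (h2 : i < (2 * k + 1) * w - 1 + w) :
    gmul w i = (-1 : Int) ^ k := by
  have hww : 1 ≤ (2 * k + 1) * w := by
    calc 1 = 1 * 1 := by norm_num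
    _ ≤ (2 * k + 1) * w := Nat.mul_le_mul (by omega) hw
  have he : (2 * k + 1 + 1) * w = (2 * k + 1) * w + w := by ring
  have hq : (i + 1) / w = 2 * k + 1 := by
    apply Nat.div_eq_of_lt_le <;> omega
  rcases Nat.even_or_odd k with ⟨j, hj⟩ | ⟨j, hj⟩
  · have hm : (2 * k + 1) % 4 = 1 := by omega
    have hp : (-1 : Int) ^ k = 1 := Even.neg_one_pow ⟨j, hj⟩
    rw [gmul, hq, hm, hp]
    simp
  · have hm : (2 * k + 1) % 4 = 3 := by omega
    have hp : (-1 : Int) ^ k = -1 := Odd.neg_one_pow ⟨j, hj⟩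
    rw [gmul, hq, hm, hp]
    simp

theorem gmul_block_zero (w i k : ℕ) (hw : 1 ≤ w)
    (h1 : (2 * k + 1) * w - 1 + w ≤ i) (h2 : i < (2 * k + 1) * w - 1 + 2 * w) :
    gmul w i = 0 := by
  have hww : 1 ≤ (2 * k + 1) * w := by
    calc 1 = 1 * 1 := by norm_num
    _ ≤ (2 * k + 1) * w := Nat.mul_le_mul (by omega) hw
  have he : (2 * k + 2 + 1) * w = (2 * k + 1) * w + 2 * w := by ring
  have he2 : (2 * k + 2) * w = (2 * k + 1) * w + w := by ring
  have hq : (i + 1) / w = 2 * k + 2 := by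
    apply Nat.div_eq_of_lt_le <;> omega
  have h4 : (2 * k + 2) % 4 ≠ 1 ∧ (2 * k + 2) % 4 ≠ 3 := by omega
  rw [gmul, hq]
  simp [h4.1, h4.2]

theorem gmul_pre (w i : ℕ) (hw : 1 ≤ w) (h : i < w - 1) : gmul w i = 0 := by
  have : (i + 1) / w = 0 := Nat.div_eq_of_lt (by omega)
  simp [gmul, this]

theorem loopA_eq (l : List Int) (w : ℕ) (hw : 1 ≤ w) :
    ∀ (m k : ℕ) (t : Int), m = l.length - ((2 * k + 1) * w - 1) →
    loopA (partial_sums l) ↑l.length ↑w (((2 * k + 1) * w - 1 : ℕ) : ℤ) ((-1) ^ k) t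
      = t + ∑ i ∈ Finset.Ico ((2 * k + 1) * w - 1) l.length, l.getD i 0 * gmul w i := by
  intro m
  induction m using Nat.strong_induction_on with
  | _ m ih =>
    intro k t hm
    set n := l.length with hn
    set s := (2 * k + 1) * w - 1 with hs
    have hww : 1 ≤ (2 * k + 1) * w := by
      calc 1 = 1 * 1 := by norm_num
      _ ≤ (2 * k + 1) * w := Nat.mul_le_mul (by omega) hw
    by_cases hsn : s < n
    · rw [loopA, dif_pos ⟨by exact_mod_cast hsn, by exact_mod_cast hw⟩]
      have he : (2 * (k + 1) + 1) * w = (2 * k + 1) * w + 2 * w := by ring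
      have hs' : (2 * (k + 1) + 1) * w - 1 = s + 2 * w := by omega
      have hcast : ((s : Int) + ↑w + ↑w) = (((2 * (k + 1) + 1) * w - 1 : ℕ) : ℤ) := by
        rw [hs']; push_cast; ring
      have hpol : (-(-1 : Int) ^ k) = (-1) ^ (k + 1) := by
        rw [pow_succ]; ring
      rw [hcast, hpol,
        ih (n - ((2 * (k + 1) + 1) * w - 1)) (by omega) (k + 1) _ rfl]
      rw [sumrangeA_eq l s w (by omega)]
      rw [hs']
      -- split the interval [s, n) at min (s+w) n and min (s+2w) n
      have h1 : s ≤ min (s + w) n := by omega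
      have h2 : min (s + w) n ≤ min (s + 2 * w) n := by omega
      have h3 : min (s + 2 * w) n ≤ n := by omega
      rw [← Finset.sum_Ico_consecutive (fun i => l.getD i 0 * gmul w i) h1
          (le_trans h2 h3),
        ← Finset.sum_Ico_consecutive (fun i => l.getD i 0 * gmul w i) h2 h3]
      have hb1 : ∑ i ∈ Finset.Ico s (min (s + w) n), l.getD i 0 * gmul w i
          = (-1 : Int) ^ k * ∑ i ∈ Finset.Ico s (min (s + w) n), l.getD i 0 := by
        rw [Finset.mul_sum]
        refine Finset.sum_congr rfl (fun i hi => ?_)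
        rw [Finset.mem_Ico] at hi
        rw [gmul_block_one w i k hw hi.1 (by omega)]
        ring
      have hb2 : ∑ i ∈ Finset.Ico (min (s + w) n) (min (s + 2 * w) n),
          l.getD i 0 * gmul w i = 0 := by
        refine Finset.sum_eq_zero (fun i hi => ?_)
        rw [Finset.mem_Ico] at hi
        rw [gmul_block_zero w i k hw (by omega) (by omega)]
        ring
      have hb3 : Finset.Ico (min (s + 2 * w) n) n = Finset.Ico (s + 2 * w) n := by
        by_cases h : s + 2 * w ≤ n
        · rw [min_eq_left h]
        · rw [min_eq_right (by omega), Finset.Ico_self,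
            Finset.Ico_eq_empty (by omega)]
      rw [hb1, hb2, hb3]
      ring
    · rw [loopA, dif_neg (by
        intro hc
        exact hsn (by exact_mod_cast hc.1))]
      rw [Finset.Ico_eq_empty (by omega), Finset.sum_empty, add_zero]

theorem list_sum_range (f : ℕ → Int) (n : ℕ) :
    ((List.range n).map f).sum = ∑ i ∈ Finset.range n, f i := by
  induction n with
  | zero => simp
  | succ n ih => rw [List.range_succ, Finset.sum_range_succ, List.map_append, List.sum_append, ih]; simp

theorem pointwise_eq (arr : List Int) (w' : ℕ) (hw : 1 ≤ w') (hwn : w' ≤ arr.length) :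
    loopA (partial_sums arr) ↑arr.length ↑w' ((w' : Int) - 1) 1 0
      = (PySem.List.pyRange 0 ↑arr.length 1).foldl
          (fun total i => total + PySem.List.pyGetD arr i 0 * patternMult ↑w' i) 0 := by
  set n := arr.length with hn
  -- left side via the loop invariant at k = 0
  have hcast : ((w' : Int) - 1) = (((2 * 0 + 1) * w' - 1 : ℕ) : ℤ) := by
    push_cast [hw]; ring_nf; omega
  have hL := loopA_eq arr w' hw (n - ((2 * 0 + 1) * w' - 1)) 0 0 rfl
  rw [pow_zero] at hL
  rw [hcast, hL, zero_add]
  -- right side: fold of additions = sum over range n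
  rw [PySem.List.foldl_add, PySem.List.pyRange_zero_nat n, List.map_map, zero_add,
    list_sum_range]
  have hpt : ∀ i : ℕ, ((fun i => PySem.List.pyGetD arr i 0 * patternMult ↑w' i) ∘
      (fun k : ℕ => (k : Int))) i = arr.getD i 0 * gmul w' i := by
    intro i
    simp only [Function.comp, PySem.List.pyGetD_natCast, patternMult_eq]
  rw [Finset.sum_congr rfl (fun i _ => hpt i)]
  -- drop the zero prefix [0, w'-1)
  have h1 : (0 : ℕ) ≤ w' - 1 := by omega
  have h2 : w' - 1 ≤ n := by omega
  rw [Finset.range_eq_Ico,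
    ← Finset.sum_Ico_consecutive (fun i => arr.getD i 0 * gmul w' i) h1 h2]
  have hz : ∑ i ∈ Finset.Ico 0 (w' - 1), arr.getD i 0 * gmul w' i = 0 := by
    refine Finset.sum_eq_zero (fun i hi => ?_)
    rw [Finset.mem_Ico] at hi
    rw [gmul_pre w' i hw hi.2]
    ring
  rw [hz, zero_add, hn]
  norm_num

-- ===== VERDICT (by name: the statement is the Claim_ definition above) =====
theorem phase_spec : Claim_equal_phase := by
  intro arr _
  unfold Spec_phase phase phase_alt
  rw [PySem.List.foldl_append_singleton_eq_map
    (fun w => PySem.Int.mod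
      |(PySem.List.pyRange 0 (↑arr.length) 1).foldl
        (fun total i => total + PySem.List.pyGetD arr i 0 * patternMult w i) 0| 10),
    List.nil_append]
  refine List.map_congr_left (fun w hw => ?_)
  rw [PySem.List.mem_pyRange_one] at hw
  lift w to ℕ using (by omega) with w'
  have hw1 : 1 ≤ w' := by exact_mod_cast hw.1
  have hwn : w' ≤ arr.length := by
    have := hw.2
    omega
  rw [pointwise_eq arr w' hw1 hwn]
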